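-- pv_equiv track=rewrite | github.com/sostrovs/Interview_questions | PythonInterviewQuestions/permutation.py | getPermutationSets
-- ===== SOURCE A (Python) =====
-- def getPermutationSets(S):
--     L = list(S)
--     P = []
--     for i in range(len(L)):
--         for j in range(len(L) - 1):
--             P.append("".join(L))
--             L[j], L[j + 1] = L[j + 1], L[j]
--
--     return P
-- ===== SOURCE B (Python) =====
-- def getPermutationSets(S):
--     # Closed form: row (i, j) is the i-th left rotation of S with its front
--     # element inserted at position j; no mutation, no carried swap state.
--     L = list(S)
--     n = len(L)
--     out = []
--     for i in range(n):
--         base = L[i:] + L[:i]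
--         head, rest = base[0], base[1:]
--         for j in range(n - 1):
--             out.append("".join(rest[:j] + [head] + rest[j:]))
--     return out
-- ===== Notes on version B (the rewrite author's own statement) =====
-- stated objective: alternative
-- what changed: Replaces A's stateful bubble-swap simulation (mutating one list and snapshotting it before every adjacent swap) with a closed-form construction: row (i,j) is computed directly as the i-th left rotation's tail with the head inserted at position j, with no mutation or carried state.
import Mathlib
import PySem

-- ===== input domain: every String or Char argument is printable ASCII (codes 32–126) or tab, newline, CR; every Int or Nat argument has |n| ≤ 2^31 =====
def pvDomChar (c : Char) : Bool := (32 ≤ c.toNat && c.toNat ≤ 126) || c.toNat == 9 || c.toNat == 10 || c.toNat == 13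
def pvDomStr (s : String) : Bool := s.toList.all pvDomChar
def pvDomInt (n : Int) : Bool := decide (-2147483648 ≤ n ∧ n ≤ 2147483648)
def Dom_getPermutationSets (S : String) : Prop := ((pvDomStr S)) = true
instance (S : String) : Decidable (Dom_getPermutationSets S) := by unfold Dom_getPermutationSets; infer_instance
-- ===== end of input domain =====

-- B replaces A's mutating bubble-swap snapshot loop with a direct closed-form row construction (objective: alternative, same cost).

-- ===== PORT A =====
-- Python: L[j], L[j+1] = L[j+1], L[j]  (j and j+1 always in range in A's loop;
-- the getD default is never read there)
def pvSwapAdj (M : List Char) (j : Nat) : List Char :=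
  (M.set j (M.getD (j+1) 'a')).set (j+1) (M.getD j 'a')

-- inner-loop body: append "".join(L) to P, then swap L[j], L[j+1]
def pvStepA (st : List Char × List String) (j : Nat) : List Char × List String :=
  (pvSwapAdj st.1 j, st.2 ++ [String.mk st.1])

-- range(k) with k = len(L), len(L)-1 is ported as List.range over the Nat count
-- (exact: Python's range(k) for k ≤ 0 is empty, matching Nat truncation)
def getPermutationSets (S : String) : List String :=
  let L := S.toList
  let n := L.length
  ((List.range n).foldl (fun st _i => (List.range (n - 1)).foldl pvStepA st) (L, [])).2

-- ===== PORT B =====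
-- Python slices L[i:], L[:i], rest[:j], rest[j:] with 0 ≤ i < n, 0 ≤ j are
-- ported as drop/take (exact for nonnegative in-range bounds)
def getPermutationSets_alt (S : String) : List String :=
  let L := S.toList
  let n := L.length
  (List.range n).foldl (fun out i =>
    let base := L.drop i ++ L.take i
    let head := base.headI
    let rest := base.tail
    out ++ (List.range (n - 1)).map (fun j => String.mk (rest.take j ++ [head] ++ rest.drop j))) []

-- ===== PRECONDITION & SPEC =====
def Spec_getPermutationSets (S : String) (out : List String) : Prop := out = getPermutationSets_alt S
instance (S : String) (out : List String) : Decidable (Spec_getPermutationSets S out) := by unfold Spec_getPermutationSets; infer_instance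

-- ===== CLAIM (what is proved, stated in full; the proofs are below) =====
def Claim_equal_getPermutationSets : Prop := ∀ (S : String), Dom_getPermutationSets S → Spec_getPermutationSets S (getPermutationSets S)

-- ===== LEMMAS AND PROOFS =====

-- the rows contributed by one outer pass whose current list is M (n = original length)
def pvRows (n : Nat) (M : List Char) : List String :=
  (List.range (n - 1)).map (fun j => String.mk (M.tail.take j ++ [M.headI] ++ M.tail.drop j))

theorem pvSwapAdj_step (h : Char) (t : List Char) (j : Nat) (hj : j < t.length) :
    pvSwapAdj (t.take j ++ [h] ++ t.drop j) j = t.take (j+1) ++ [h] ++ t.drop (j+1) := by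
  induction j generalizing t with
  | zero =>
    cases t with
    | nil => simp at hj
    | cons a t' => simp [pvSwapAdj]
  | succ j ih =>
    cases t with
    | nil => simp at hj
    | cons a t' =>
      have hj' : j < t'.length := by simpa using hj
      have := ih t' hj'
      simp only [List.take_succ_cons, List.drop_succ_cons, List.cons_append,
        pvSwapAdj, List.set_cons_succ, List.getD, List.getElem?_cons_succ] at *
      simpa [pvSwapAdj, List.getD] using this

-- inner loop, partial: after m steps the head has bubbled to position m
theorem pvInner_aux (h : Char) (t : List Char) (P : List String) (m : Nat) (hm : m ≤ t.length) :
    (List.range m).foldl pvStepA (h :: t, P)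
      = (t.take m ++ [h] ++ t.drop m,
         P ++ (List.range m).map (fun j => String.mk (t.take j ++ [h] ++ t.drop j))) := by
  induction m with
  | zero => simp
  | succ m ih =>
    have hm' : m ≤ t.length := Nat.le_of_succ_le hm
    rw [List.range_succ, List.foldl_append, ih hm']
    simp only [List.foldl_cons, List.foldl_nil, pvStepA]
    rw [pvSwapAdj_step h t m (Nat.lt_of_succ_le hm)]
    simp [List.map_append]


theorem pvInner (h : Char) (t : List Char) (P : List String) :
    (List.range t.length).foldl pvStepA (h :: t, P)
      = (t ++ [h], P ++ pvRows (t.length + 1) (h :: t)) := by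
  rw [pvInner_aux h t P t.length le_rfl]
  simp [pvRows]

theorem pvRot_succ (L : List Char) (i : Nat) (hi : i < L.length) :
    (L.drop i ++ L.take i).tail ++ [(L.drop i ++ L.take i).headI]
      = L.drop (i+1) ++ L.take (i+1) := by
  rw [List.drop_eq_getElem_cons hi]
  simp only [List.cons_append, List.tail_cons, List.headI, List.append_assoc]
  congr 1
  rw [List.take_add_one, List.getElem?_eq_getElem hi]
  rfl

theorem pvOuter (L : List Char) (i : Nat) (hi : i ≤ L.length) :
    (List.range i).foldl (fun st _i => (List.range (L.length - 1)).foldl pvStepA st) (L, [])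
      = (L.drop i ++ L.take i,
         (List.range i).foldl (fun P i' => P ++ pvRows L.length (L.drop i' ++ L.take i')) []) := by
  induction i with
  | zero => simp
  | succ i ih =>
    have hi' : i < L.length := Nat.lt_of_succ_le hi
    rw [List.range_succ, List.foldl_append, ih (Nat.le_of_lt hi')]
    simp only [List.foldl_cons, List.foldl_nil]
    have hne : L.drop i ++ L.take i ≠ [] := by
      have : (L.drop i ++ L.take i).length = L.length := by
        rw [List.length_append, List.length_drop, List.length_take]; omega
      intro hcon
      rw [hcon] at this
      simp at this
      omega
    obtain ⟨h, t, hht⟩ := List.exists_cons_of_ne_nil hne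
    have hlen : t.length = L.length - 1 := by
      have : (L.drop i ++ L.take i).length = L.length := by
        rw [List.length_append, List.length_drop, List.length_take]; omega
      rw [hht] at this
      simp at this
      omega
    rw [hht, ← hlen, pvInner h t _]
    have h1 : t ++ [h] = L.drop (i+1) ++ L.take (i+1) := by
      have := pvRot_succ L i hi'
      rw [hht] at this
      simpa using this
    have h2 : pvRows (t.length + 1) (h :: t) = pvRows L.length (L.drop i ++ L.take i) := by
      rw [hht, hlen]
      congr 1
      omega
    rw [h1, h2]
    simp [List.foldl_append]

-- ===== VERDICT (by name: the statement is the Claim_ definition above) =====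
theorem getPermutationSets_spec : Claim_equal_getPermutationSets := by
  intro S _
  unfold Spec_getPermutationSets getPermutationSets getPermutationSets_alt
  simp only
  rw [pvOuter S.toList S.toList.length le_rfl]
  simp only [pvRows]
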